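-- pv_equiv track=rewrite | github.com/yousef-yy4u/daddy123 | venv/Scripts/css-html-prettify.py | _compile_props
-- ===== SOURCE A (Python) =====
-- def _compile_props(props_text: str, grouped: bool=False) -> tuple:
--     """Take a list of props and prepare them."""
--     props, prefixes = [], "-webkit-,-khtml-,-epub-,-moz-,-ms-,-o-,".split(",")
--     for propline in props_text.strip().lower().splitlines():
--         props += [pre + pro for pro in propline.split(" ") for pre in prefixes]
--     props = filter(lambda line: not line.startswith('#'), props)
--     if not grouped:
--         props = list(filter(None, props))
--         return props, [0] * len(props)
--     final_props, groups, g_id = [], [], 0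
--     for prop in props:
--         if prop.strip():
--             final_props.append(prop)
--             groups.append(g_id)
--         else:
--             g_id += 1
--     return (final_props, groups)
-- ===== SOURCE B (Python) =====
-- _PREFIXES = ("-webkit-", "-khtml-", "-epub-", "-moz-", "-ms-", "-o-")
--
--
-- def _compile_props(props_text: str, grouped: bool = False) -> tuple:
--     """Take a list of props and prepare them."""
--     words = [w for line in props_text.strip().lower().splitlines()
--              for w in line.split(" ")]
--     if not grouped:
--         props = []
--         for w in words:
--             props.extend(p + w for p in _PREFIXES)
--             if w and not w.startswith('#'):
--                 props.append(w)
--         return props, [0] * len(props)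
--     props, groups, g_id = [], [], 0
--     for w in words:
--         for p in _PREFIXES:
--             props.append(p + w)
--             groups.append(g_id)
--         if w.startswith('#'):
--             continue
--         if w.strip():
--             props.append(w)
--             groups.append(g_id)
--         else:
--             g_id += 1
--     return (props, groups)
-- ===== Notes on version B (the rewrite author's own statement) =====
-- stated objective: simpler
-- what changed: A builds the whole prefixed-entry list, then filters out comment-marker entries, then makes a second truthiness-filtering or group-rescanning pass over the list; B makes one pass over the words, emitting the six dash-prefixed variants unconditionally (they can never start with a comment marker or be blank) and testing only the bare word inline.
import Mathlib
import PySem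

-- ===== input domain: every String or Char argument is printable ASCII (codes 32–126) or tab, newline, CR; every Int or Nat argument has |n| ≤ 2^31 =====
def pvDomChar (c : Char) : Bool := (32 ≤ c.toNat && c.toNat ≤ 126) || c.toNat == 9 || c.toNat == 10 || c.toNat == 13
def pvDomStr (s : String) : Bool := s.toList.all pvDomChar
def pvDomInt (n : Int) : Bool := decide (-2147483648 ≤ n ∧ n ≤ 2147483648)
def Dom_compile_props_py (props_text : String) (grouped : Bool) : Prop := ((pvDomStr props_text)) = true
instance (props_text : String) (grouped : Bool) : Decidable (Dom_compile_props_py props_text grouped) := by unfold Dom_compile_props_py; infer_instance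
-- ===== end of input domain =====

-- B restructures A's build-all / filter / re-scan pipeline into a single pass over the words:
-- the six dash-prefixed variants are emitted unconditionally (they can never start with '#',
-- be empty, or strip to empty) and only the bare word is tested; objective: simpler.

-- ===== PORT A =====
-- step of A's grouped 'for prop in props' loop; state = (final_props, groups, g_id)
def pvStepA (st : List (List Char) × List Int × Int) (prop : List Char) :
    List (List Char) × List Int × Int :=
  if PySem.Chars.strip prop ≠ [] then (st.1 ++ [prop], st.2.1 ++ [st.2.2], st.2.2)
  else (st.1, st.2.1, st.2.2 + 1)

def compile_props_py (props_text : String) (grouped : Bool) : List String × List Int :=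
  let prefixes : List (List Char) :=
    PySem.Chars.splitOn "-webkit-,-khtml-,-epub-,-moz-,-ms-,-o-,".toList [',']
  let props : List (List Char) :=
    (PySem.Chars.splitlines (PySem.Chars.lower (PySem.Chars.strip props_text.toList))).foldl
      (fun acc propline =>
        acc ++ (PySem.Chars.splitOn propline [' ']).flatMap
          (fun pro => prefixes.map (fun pre => pre ++ pro))) []
  let props := props.filter (fun line => !(PySem.Chars.startswith line ['#']))
  if !grouped then
    let props := props.filter (fun l => !l.isEmpty)
    (props.map String.ofList, PySem.List.pyRepeat [(0 : Int)] props.length)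
  else
    let r := props.foldl pvStepA ([], [], 0)
    (r.1.map String.ofList, r.2.1)

-- ===== PORT B =====
def pvBPrefixes : List (List Char) :=
  ["-webkit-".toList, "-khtml-".toList, "-epub-".toList, "-moz-".toList, "-ms-".toList, "-o-".toList]

-- B's grouped per-word step: six prefixed entries appended one by one, then the bare word
def pvStepB (st : List (List Char) × List Int × Int) (w : List Char) :
    List (List Char) × List Int × Int :=
  let st1 := pvBPrefixes.foldl
    (fun st p => (st.1 ++ [p ++ w], st.2.1 ++ [st.2.2], st.2.2)) st
  if PySem.Chars.startswith w ['#'] then st1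
  else if PySem.Chars.strip w ≠ [] then (st1.1 ++ [w], st1.2.1 ++ [st1.2.2], st1.2.2)
  else (st1.1, st1.2.1, st1.2.2 + 1)

def compile_props_py_alt (props_text : String) (grouped : Bool) : List String × List Int :=
  let words : List (List Char) :=
    (PySem.Chars.splitlines (PySem.Chars.lower (PySem.Chars.strip props_text.toList))).flatMap
      (fun line => PySem.Chars.splitOn line [' '])
  if !grouped then
    let props := words.foldl
      (fun acc w =>
        (acc ++ pvBPrefixes.map (fun p => p ++ w)) ++
          (if w ≠ [] ∧ ¬ PySem.Chars.startswith w ['#'] then [w] else [])) []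
    (props.map String.ofList, PySem.List.pyRepeat [(0 : Int)] props.length)
  else
    let r := words.foldl pvStepB ([], [], 0)
    (r.1.map String.ofList, r.2.1)

-- ===== PRECONDITION & SPEC =====
def Spec_compile_props_py (props_text : String) (grouped : Bool) (out : List String × List Int) : Prop := out = compile_props_py_alt props_text grouped
instance (props_text : String) (grouped : Bool) (out : List String × List Int) : Decidable (Spec_compile_props_py props_text grouped out) := by unfold Spec_compile_props_py; infer_instance

-- ===== CLAIM (what is proved, stated in full; the proofs are below) =====
def Claim_equal_compile_props_py : Prop := ∀ (props_text : String) (grouped : Bool), Dom_compile_props_py props_text grouped → Spec_compile_props_py props_text grouped (compile_props_py props_text grouped)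

-- ===== LEMMAS AND PROOFS =====

-- A's prefix list (split of the literal) is B's six prefixes plus the trailing empty one
lemma pv_prefixes_eq :
    PySem.Chars.splitOn "-webkit-,-khtml-,-epub-,-moz-,-ms-,-o-,".toList [','] =
      pvBPrefixes ++ [[]] := by decide

-- a word with a leading '-' never starts with '#'
lemma pv_startswith_dash (r : List Char) : PySem.Chars.startswith ('-'::r) ['#'] = false := by
  simp only [Bool.eq_false_iff, Ne, PySem.Chars.startswith_iff]
  simp [List.cons_prefix_cons]

-- a word with a leading '-' never strips to the empty string
lemma pv_strip_dash (r : List Char) : PySem.Chars.strip ('-'::r) ≠ [] := by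
  simp [PySem.Chars.strip, PySem.Chars.lstrip, PySem.Chars.rstrip, PySem.Chars.isspace]
  exact ⟨'-', by simp, by decide⟩

lemma pv_sw_nil : PySem.Chars.startswith ([] : List Char) ['#'] = false := by decide

-- A's two successive filters, restricted to the 7-entry block of one word
lemma pv_perword (w : List Char) :
    (((pvBPrefixes ++ [[]]).map (· ++ w)).filter
        (fun line => !(PySem.Chars.startswith line ['#']))).filter (fun l => !l.isEmpty)
    = pvBPrefixes.map (fun p => p ++ w) ++
        (if w ≠ [] ∧ ¬ PySem.Chars.startswith w ['#'] then [w] else []) := by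
  cases w with
  | nil => simp [pvBPrefixes, pv_startswith_dash, pv_sw_nil, List.filter]
  | cons c t =>
    by_cases h1 : PySem.Chars.startswith (c::t) ['#'] <;>
    simp [pvBPrefixes, pv_startswith_dash, h1, List.filter]

-- A's '#' filter alone, restricted to the 7-entry block of one word
lemma pv_perword_g (w : List Char) :
    ((pvBPrefixes ++ [[]]).map (· ++ w)).filter
        (fun line => !(PySem.Chars.startswith line ['#']))
    = pvBPrefixes.map (fun p => p ++ w) ++
        (if PySem.Chars.startswith w ['#'] then [] else [w]) := by
  by_cases h1 : PySem.Chars.startswith w ['#'] <;>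
  simp [pvBPrefixes, pv_startswith_dash, h1, List.filter]

-- A's grouped loop over one word's filtered block = B's per-word step
lemma pv_step_fold (w : List Char) (st : List (List Char) × List Int × Int) :
    ((pvBPrefixes.map (fun p => p ++ w) ++
        (if PySem.Chars.startswith w ['#'] then [] else [w])).foldl pvStepA st) = pvStepB st w := by
  by_cases h1 : PySem.Chars.startswith w ['#'] <;>
  by_cases h2 : PySem.Chars.strip w = [] <;>
  simp [pvStepA, pvStepB, pvBPrefixes, pv_strip_dash, h1, h2]

-- A's accumulation loop, as a flatMap over the concatenated word list
lemma pv_propsA (L : List (List Char)) :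
    (L.foldl (fun acc propline =>
        acc ++ (PySem.Chars.splitOn propline [' ']).flatMap
          (fun pro => (pvBPrefixes ++ [[]]).map (fun pre => pre ++ pro))) [])
    = (L.flatMap (fun line => PySem.Chars.splitOn line [' '])).flatMap
        (fun w => (pvBPrefixes ++ [[]]).map (· ++ w)) := by
  rw [List.flatMap_assoc]
  simpa using PySem.List.foldl_append_eq_flatMap
    (fun propline => (PySem.Chars.splitOn propline [' ']).flatMap
      (fun pro => (pvBPrefixes ++ [[]]).map (fun pre => pre ++ pro))) L []

-- ungrouped branch: A's filtered pipeline = B's single-pass fold, for any line list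
lemma pv_ungrouped (L : List (List Char)) :
    ((L.foldl (fun acc propline =>
        acc ++ (PySem.Chars.splitOn propline [' ']).flatMap
          (fun pro => (pvBPrefixes ++ [[]]).map (fun pre => pre ++ pro))) []).filter
        (fun line => !(PySem.Chars.startswith line ['#']))).filter (fun l => !l.isEmpty)
    = (L.flatMap (fun line => PySem.Chars.splitOn line [' '])).foldl
        (fun acc w =>
          (acc ++ pvBPrefixes.map (fun p => p ++ w)) ++
            (if w ≠ [] ∧ ¬ PySem.Chars.startswith w ['#'] then [w] else [])) [] := by
  rw [pv_propsA, List.filter_flatMap, List.filter_flatMap]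
  simp only [List.append_assoc]
  rw [show ∀ (W : List (List Char)), W.foldl (fun acc w =>
        acc ++ (pvBPrefixes.map (fun p => p ++ w) ++
          (if w ≠ [] ∧ ¬ PySem.Chars.startswith w ['#'] then [w] else []))) [] =
      W.flatMap (fun w => pvBPrefixes.map (fun p => p ++ w) ++
          (if w ≠ [] ∧ ¬ PySem.Chars.startswith w ['#'] then [w] else []))
    from fun W => by
      simpa using PySem.List.foldl_append_eq_flatMap
        (fun w => pvBPrefixes.map (fun p => p ++ w) ++
          (if w ≠ [] ∧ ¬ PySem.Chars.startswith w ['#'] then [w] else [])) W []]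
  exact List.flatMap_congr (fun w _ => pv_perword w)

-- grouped branch: A's filter-then-rescan = B's stateful single pass, for any line list
lemma pv_grouped (L : List (List Char)) :
    ((L.foldl (fun acc propline =>
        acc ++ (PySem.Chars.splitOn propline [' ']).flatMap
          (fun pro => (pvBPrefixes ++ [[]]).map (fun pre => pre ++ pro))) []).filter
        (fun line => !(PySem.Chars.startswith line ['#']))).foldl pvStepA ([], [], 0)
    = (L.flatMap (fun line => PySem.Chars.splitOn line [' '])).foldl pvStepB ([], [], 0) := by
  rw [pv_propsA, List.filter_flatMap]
  simp only [pv_perword_g]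
  rw [List.foldl_flatMap]
  congr 1
  funext st w
  exact pv_step_fold w st

-- ===== VERDICT (by name: the statement is the Claim_ definition above) =====
theorem compile_props_py_spec : Claim_equal_compile_props_py := by
  intro s grouped _
  unfold Spec_compile_props_py
  cases grouped <;>
    simp only [compile_props_py, compile_props_py_alt, pv_prefixes_eq,
      Bool.not_true, Bool.not_false, Bool.false_eq_true,
      if_true, if_false]
  · rw [pv_ungrouped]
  · rw [pv_grouped]
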